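-- pv_equiv track=rewrite | github.com/queelius/computational-explorations | src/extremal_coprime.py | coprime_edge_count
-- ===== SOURCE A (Python) =====
-- import math
-- from typing import Set, List, Dict, Any, Optional, Tuple
--
-- def coprime_edge_count(A: Set[int]) -> int:
--     """Count edges in coprime graph G(A)."""
--     A_list = sorted(A)
--     count = 0
--     for i in range(len(A_list)):
--         for j in range(i + 1, len(A_list)):
--             if math.gcd(A_list[i], A_list[j]) == 1:
--                 count += 1
--     return count
-- ===== SOURCE B (Python) =====
-- import math
--
-- def _prime_factors(n):
--     """Distinct prime factors of n >= 1 by trial division, increasing."""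
--     ps = []
--     d = 2
--     while d * d <= n:
--         if n % d == 0:
--             ps.append(d)
--             while n % d == 0:
--                 n //= d
--         d += 1
--     if n > 1:
--         ps.append(n)
--     return ps
--
-- def coprime_edge_count(A):
--     """Count edges in coprime graph G(A) by Mobius-style inclusion-exclusion:
--     a counter over squarefree divisors of the elements seen so far replaces all
--     pairwise gcd computations."""
--     count = 0
--     zeros = 0
--     ones = 0
--     cnt = {}
--     for x in A:
--         a = abs(x)
--         if a == 0:
--             count += ones
--             zeros += 1
--         else:
--             divs = [(1, 1)]
--             for p in _prime_factors(a):
--                 divs += [(d * p, -m) for (d, m) in divs]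
--             for (d, m) in divs:
--                 count += m * cnt.get(d, 0)
--             if a == 1:
--                 count += zeros
--                 ones += 1
--             for (d, _) in divs:
--                 cnt[d] = cnt.get(d, 0) + 1
--     return count
-- ===== Notes on version B (the rewrite author's own statement) =====
-- stated objective: alternative
-- what changed: B never computes a gcd and has no pairwise loop: it factors each element, enumerates the squarefree divisors of its radical, and counts coprime predecessors by Moebius inclusion-exclusion over a running divisor counter (zeros and units tracked separately), O(n(sqrt(M)+2^omega)) instead of A's O(n^2 log M) pair scan.
import Mathlib
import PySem

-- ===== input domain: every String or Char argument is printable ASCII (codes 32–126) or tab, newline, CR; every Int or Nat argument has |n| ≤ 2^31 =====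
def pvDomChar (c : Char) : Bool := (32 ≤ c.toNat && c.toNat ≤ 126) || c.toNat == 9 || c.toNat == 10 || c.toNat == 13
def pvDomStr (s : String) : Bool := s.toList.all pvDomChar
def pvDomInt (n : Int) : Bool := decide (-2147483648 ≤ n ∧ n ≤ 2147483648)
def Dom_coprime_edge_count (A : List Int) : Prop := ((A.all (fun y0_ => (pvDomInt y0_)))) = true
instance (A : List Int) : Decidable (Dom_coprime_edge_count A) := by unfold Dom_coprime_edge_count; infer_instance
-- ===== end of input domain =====

-- B replaces A's pairwise gcd scan by Möbius-style inclusion-exclusion: each element is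
-- factored once and matched against a running counter of squarefree divisors (objective:
-- alternative algorithm; no speed claim).

-- ===== PORT A =====
def coprime_edge_count (A : List Int) : Int :=
  let A_list := PySem.List.sorted A (fun x => x) false
  (PySem.List.pyRange 0 (A_list.length : Int) 1).foldl (fun count i =>
    (PySem.List.pyRange (i + 1) (A_list.length : Int) 1).foldl (fun count j =>
      if Int.gcd (PySem.List.pyGetD A_list i 0) (PySem.List.pyGetD A_list j 0) = 1 then
        count + 1
      else count) count) 0

-- ===== PORT B =====
-- inner `while n % d == 0: n //= d` of _prime_factors; fuel only makes the loop
-- structurally total (n.toNat iterations always suffice, see pvStripGo_spec)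
def pvStripGo : Nat → Int → Int → Int
  | 0, n, _ => n
  | fuel + 1, n, d =>
      if PySem.Int.mod n d = 0 then pvStripGo fuel (PySem.Int.floordiv n d) d else n

def pvStrip (n d : Int) : Int := pvStripGo n.toNat n d

-- `while d * d <= n: …` of _prime_factors; fuel is again only a totality guard
def pvPFGo : Nat → Int → Int → List Int
  | 0, _, _ => []
  | fuel + 1, n, d =>
      if d * d ≤ n then
        if PySem.Int.mod n d = 0 then d :: pvPFGo fuel (pvStrip n d) (d + 1)
        else pvPFGo fuel n (d + 1)
      else if 1 < n then [n] else []

def pvPrimeFactors (n : Int) : List Int := pvPFGo (n.toNat + 2) n 2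

-- one step of `for p in ps: divs += [(d*p, -m) for (d,m) in divs]`
def pvDStep (divs : List (Int × Int)) (p : Int) : List (Int × Int) :=
  divs ++ divs.map (fun dm => (dm.1 * p, -dm.2))

def pvDivs (ps : List Int) : List (Int × Int) :=
  ps.foldl pvDStep [((1 : Int), (1 : Int))]

-- one iteration of B's main loop, state (count, zeros, ones, cnt)
def pvStep (st : Int × Int × Int × PySem.Dict Int Int) (x : Int) :
    Int × Int × Int × PySem.Dict Int Int :=
  match st with
  | (count, zeros, ones, cnt) =>
    let a := |x|
    if a = 0 then (count + ones, zeros + 1, ones, cnt)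
    else
      let divs := pvDivs (pvPrimeFactors a)
      let count := divs.foldl (fun c dm => c + dm.2 * cnt.getD dm.1 0) count
      let count := if a = 1 then count + zeros else count
      let ones := if a = 1 then ones + 1 else ones
      let cnt := divs.foldl (fun cn (dm : Int × Int) => cn.modify dm.1 0 (· + 1)) cnt
      (count, zeros, ones, cnt)

def coprime_edge_count_alt (A : List Int) : Int :=
  (A.foldl pvStep (0, 0, 0, PySem.Dict.empty)).1

-- ===== PRECONDITION & SPEC =====
def Spec_coprime_edge_count (A : List Int) (out : Int) : Prop := out = coprime_edge_count_alt A
instance (A : List Int) (out : Int) : Decidable (Spec_coprime_edge_count A out) := by unfold Spec_coprime_edge_count; infer_instance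

-- ===== CLAIM (what is proved, stated in full; the proofs are below) =====
def Claim_equal_coprime_edge_count : Prop := ∀ (A : List Int), Dom_coprime_edge_count A → Spec_coprime_edge_count A (coprime_edge_count A)

-- ===== LEMMAS AND PROOFS =====

-- number of elements of ys coprime to x
def pvCnt (x : Int) (ys : List Int) : Int := (ys.countP (fun y => decide (Int.gcd x y = 1)) : Int)

-- triangular pair count, structurally
def pvF : List Int → Int
  | [] => 0
  | x :: xs => pvCnt x xs + pvF xs

-- 0/1 divisibility indicator
def pvInd (b t : Int) : Int := if t ∣ b then 1 else 0

-- "t is one of the squarefree divisors counted for a nonzero y"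
def pvKey (t y : Int) : Bool :=
  decide (y ≠ 0) && decide (t ∈ (pvDivs (pvPrimeFactors |y|)).map Prod.fst)

def pvZeros (S : List Int) : Int := (S.countP (fun y => decide (y = 0)) : Int)
def pvOnes (S : List Int) : Int := (S.countP (fun y => decide (|y| = 1)) : Int)

-- positive prime
def pvPP (q : Int) : Prop := Prime q ∧ 2 ≤ q

-- ---------- A-side: the triangular loop computes pvF of the sorted list ----------

lemma pvCnt_cons (x y : Int) (ys : List Int) :
    pvCnt x (y :: ys) = (if Int.gcd x y = 1 then 1 else 0) + pvCnt x ys := by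
  by_cases h : Int.gcd x y = 1 <;> simp [pvCnt, h]
  omega

lemma pvF_perm : ∀ {l₁ l₂ : List Int}, l₁.Perm l₂ → pvF l₁ = pvF l₂ := by
  intro l₁ l₂ h
  induction h with
  | nil => rfl
  | cons x p ih => simp [pvF, ih, pvCnt, p.countP_eq]
  | swap x y l =>
      simp only [pvF, pvCnt_cons]
      rw [Int.gcd_comm x y]
      omega
  | trans p q ih₁ ih₂ => omega

lemma range_sum_eq_pvF : ∀ (l : List Int),
    ((List.range l.length).map (fun k => pvCnt (l.getD k 0) (l.drop (k + 1)))).sum = pvF l := by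
  intro l
  induction l with
  | nil => simp [pvF]
  | cons x xs ih =>
      rw [show (x :: xs).length = xs.length + 1 from rfl, List.range_succ_eq_map]
      simp only [List.map_cons, List.map_map, List.sum_cons]
      have h : ((List.range xs.length).map
          ((fun k => pvCnt ((x :: xs).getD k 0) ((x :: xs).drop (k + 1))) ∘ Nat.succ)).sum
          = ((List.range xs.length).map (fun k => pvCnt (xs.getD k 0) (xs.drop (k + 1)))).sum := by
        apply congrArg
        apply List.map_congr_left
        intro k _
        simp [Function.comp, List.getD]
      rw [h, ih]
      simp [pvF]

lemma a_eq_pvF_sorted (A : List Int) :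
    coprime_edge_count A = pvF (PySem.List.sorted A (fun x => x) false) := by
  show (let A_list := PySem.List.sorted A (fun x => x) false;
    (PySem.List.pyRange 0 (A_list.length : Int) 1).foldl (fun count i =>
      (PySem.List.pyRange (i + 1) (A_list.length : Int) 1).foldl (fun count j =>
        if Int.gcd (PySem.List.pyGetD A_list i 0) (PySem.List.pyGetD A_list j 0) = 1 then
          count + 1
        else count) count) 0) = _
  set l := PySem.List.sorted A (fun x => x) false with hl
  simp only []
  have step : ∀ (acc i : Int), i ∈ PySem.List.pyRange 0 (l.length : Int) 1 →
      (PySem.List.pyRange (i + 1) (l.length : Int) 1).foldl (fun count j =>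
        if Int.gcd (PySem.List.pyGetD l i 0) (PySem.List.pyGetD l j 0) = 1 then count + 1
        else count) acc
      = acc + pvCnt (PySem.List.pyGetD l i 0) (l.drop (i + 1).toNat) := by
    intro acc i hi
    have h0 : (0 : Int) ≤ i + 1 := by
      have := (PySem.List.mem_pyRange_one.mp hi).1
      omega
    rw [PySem.List.foldl_pyRange_pyGetD' (a := i + 1) (xs := l)
          (f := fun c y => if Int.gcd (PySem.List.pyGetD l i 0) y = 1 then c + 1 else c)
          (d := 0) (init := acc) h0]
    rw [PySem.List.foldl_ite_add_one]
    rfl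
  rw [PySem.List.foldl_congr_mem (PySem.List.pyRange 0 (l.length : Int) 1) _
      (fun (count i : Int) => count + pvCnt (PySem.List.pyGetD l i 0) (l.drop (i + 1).toNat)) 0
      (fun acc i hi => step acc i hi)]
  rw [PySem.List.foldl_add, PySem.List.pyRange_one]
  simp only [List.map_map, Int.sub_zero, Int.toNat_natCast, zero_add]
  have h : ((List.range l.length).map
      ((fun i => pvCnt (PySem.List.pyGetD l i 0) (l.drop (i + 1).toNat)) ∘ (fun k : Nat => (k : Int)))).sum
      = ((List.range l.length).map (fun k => pvCnt (l.getD k 0) (l.drop (k + 1)))).sum := by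
    apply congrArg
    apply List.map_congr_left
    intro k _
    simp only [Function.comp]
    rw [PySem.List.pyGetD_natCast, show ((k : Int) + 1).toNat = k + 1 by omega]
  rw [h, range_sum_eq_pvF]

-- ---------- B-side: trial division ----------

lemma pvStripGo_spec (fuel : Nat) : ∀ n d : Int, 1 ≤ n → 2 ≤ d → n.toNat ≤ fuel →
    1 ≤ pvStripGo fuel n d ∧ pvStripGo fuel n d ∣ n ∧ ¬ d ∣ pvStripGo fuel n d := by
  induction fuel with
  | zero => intro n d hn hd hf; omega
  | succ fuel ih =>
      intro n d hn hd hf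
      simp only [pvStripGo]
      by_cases hmod : PySem.Int.mod n d = 0
      · rw [if_pos hmod]
        have hdvd : d ∣ n := (PySem.Int.mod_eq_zero_iff_dvd n d).mp hmod
        have hfd : PySem.Int.floordiv n d = n / d := PySem.Int.floordiv_eq_ediv_of_pos (by omega)
        have hmul : d * (n / d) = n := Int.mul_ediv_cancel' hdvd
        have hq : 1 ≤ n / d := by nlinarith [Int.ediv_nonneg (le_trans (by omega) hn) (by omega : (0:Int) ≤ d)]
        have hlt : n / d < n := by rw [Int.ediv_lt_iff_lt_mul (by omega)]; nlinarith
        rw [hfd]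
        obtain ⟨h1, h2, h3⟩ := ih (n / d) d hq hd (by omega)
        exact ⟨h1, h2.trans ⟨d, by linarith [hmul]⟩, h3⟩
      · rw [if_neg hmod]
        exact ⟨hn, dvd_refl n, fun hc => hmod ((PySem.Int.mod_eq_zero_iff_dvd n d).mpr hc)⟩

lemma pvStrip_spec (n d : Int) (hn : 1 ≤ n) (hd : 2 ≤ d) :
    1 ≤ pvStrip n d ∧ pvStrip n d ∣ n ∧ ¬ d ∣ pvStrip n d :=
  pvStripGo_spec n.toNat n d hn hd le_rfl

lemma pvStripGo_prime_dvd (fuel : Nat) : ∀ n d q : Int, Prime q → ¬ q ∣ d → 1 ≤ n → 2 ≤ d →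
    n.toNat ≤ fuel → (q ∣ pvStripGo fuel n d ↔ q ∣ n) := by
  induction fuel with
  | zero => intro n d q _ _ hn hd hf; omega
  | succ fuel ih =>
      intro n d q hq hqd hn hd hf
      simp only [pvStripGo]
      by_cases hmod : PySem.Int.mod n d = 0
      · rw [if_pos hmod]
        have hdvd : d ∣ n := (PySem.Int.mod_eq_zero_iff_dvd n d).mp hmod
        have hfd : PySem.Int.floordiv n d = n / d := PySem.Int.floordiv_eq_ediv_of_pos (by omega)
        have hmul : d * (n / d) = n := Int.mul_ediv_cancel' hdvd
        have hq1 : 1 ≤ n / d := by nlinarith [Int.ediv_nonneg (le_trans (by omega) hn) (by omega : (0:Int) ≤ d)]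
        have hlt : n / d < n := by rw [Int.ediv_lt_iff_lt_mul (by omega)]; nlinarith
        rw [hfd, ih (n / d) d q hq hqd hq1 hd (by omega)]
        constructor
        · intro hqn
          exact hqn.trans ⟨d, by linarith [hmul]⟩
        · intro hqn
          rcases (hq.dvd_mul.mp (by rw [hmul]; exact hqn)) with h | h
          · exact absurd h hqd
          · exact h
      · rw [if_neg hmod]

lemma pvStrip_prime_dvd (q n d : Int) (hq : Prime q) (hqd : ¬ q ∣ d) (hn : 1 ≤ n) (hd : 2 ≤ d) :
    q ∣ pvStrip n d ↔ q ∣ n :=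
  pvStripGo_prime_dvd n.toNat n d q hq hqd hn hd le_rfl

lemma pvPP_cast (k : Nat) (hk : k.Prime) : pvPP (k : Int) :=
  ⟨Nat.prime_iff_prime_int.mp hk, by exact_mod_cast hk.two_le⟩

lemma pvPP_dvd_eq (p q : Int) (hp : pvPP p) (hq : pvPP q) (h : p ∣ q) : p = q := by
  have hp' : p.natAbs.Prime := Int.prime_iff_natAbs_prime.mp hp.1
  have hq' : q.natAbs.Prime := Int.prime_iff_natAbs_prime.mp hq.1
  have hdvd : p.natAbs ∣ q.natAbs := Int.natAbs_dvd_natAbs.mpr h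
  have h1 := (Nat.prime_dvd_prime_iff_eq hp' hq').mp hdvd
  have h2 := hp.2
  have h3 := hq.2
  omega

lemma pvPrime_of_no_small (m : Int) (hm : 2 ≤ m)
    (h : ∀ q : Int, pvPP q → q * q ≤ m → ¬ q ∣ m) : Prime m := by
  by_contra hcomp
  set k := m.toNat with hk
  have hmk : (k : Int) = m := Int.toNat_of_nonneg (by omega)
  have hk2 : 2 ≤ k := by omega
  have hkcomp : ¬ k.Prime := by
    intro hkp
    exact hcomp (by rw [← hmk]; exact Nat.prime_iff_prime_int.mp hkp)
  have hpp : k.minFac.Prime := Nat.minFac_prime (by omega)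
  have hdvd : (k.minFac : Int) ∣ m := by
    rw [← hmk]
    exact_mod_cast Int.natCast_dvd_natCast.mpr (Nat.minFac_dvd k)
  have hsq : k.minFac ^ 2 ≤ k := Nat.minFac_sq_le_self (by omega) hkcomp
  have hsq' : (k.minFac : Int) * (k.minFac : Int) ≤ m := by
    rw [← hmk]
    exact_mod_cast (by nlinarith [hsq] : k.minFac * k.minFac ≤ k)
  exact h _ (pvPP_cast _ hpp) hsq' hdvd

lemma pvPFGo_spec (fuel : Nat) : ∀ n d : Int,
    1 ≤ n → 2 ≤ d → (∀ q : Int, pvPP q → q < d → ¬ q ∣ n) → n.toNat + 1 - d.toNat < fuel →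
    (∀ p ∈ pvPFGo fuel n d, pvPP p ∧ d ≤ p) ∧ (pvPFGo fuel n d).Nodup ∧
    (∀ q : Int, pvPP q → (q ∣ n ↔ q ∈ pvPFGo fuel n d)) := by
  induction fuel with
  | zero => intro n d hn hd hsmall hf; omega
  | succ fuel ih =>
      intro n d hn hd hsmall hf
      simp only [pvPFGo]
      by_cases hg : d * d ≤ n
      · have hdn : d ≤ n := le_trans (by nlinarith) hg
        rw [if_pos hg]
        by_cases hmod : PySem.Int.mod n d = 0
        · rw [if_pos hmod]
          have hdvd : d ∣ n := (PySem.Int.mod_eq_zero_iff_dvd n d).mp hmod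
          -- d is prime
          have hdp : Prime d := by
            apply pvPrime_of_no_small d hd
            intro q hq hqq hqd
            have hqlt : q < d := by nlinarith [hq.2]
            exact hsmall q hq hqlt (hqd.trans hdvd)
          obtain ⟨hs1, hs2, hs3⟩ := pvStrip_spec n d hn hd
          have hsle : pvStrip n d ≤ n := Int.le_of_dvd (by omega) hs2
          have hsmall' : ∀ q : Int, pvPP q → q < d + 1 → ¬ q ∣ pvStrip n d := by
            intro q hq hqlt hqdvd
            by_cases hqd : q = d
            · exact hs3 (hqd ▸ hqdvd)
            · have : q < d := by
                rcases lt_or_eq_of_le (by omega : q ≤ d) with h | h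
                · exact h
                · exact absurd h hqd
              exact hsmall q hq this (hqdvd.trans hs2)
          obtain ⟨ihm, ihnd, ihsupp⟩ := ih (pvStrip n d) (d + 1) hs1 (by omega) hsmall' (by omega)
          refine ⟨?_, ?_, ?_⟩
          · intro p hp
            rcases List.mem_cons.mp hp with h | h
            · exact ⟨h ▸ ⟨hdp, hd⟩, by omega⟩
            · obtain ⟨hpp, hple⟩ := ihm p h
              exact ⟨hpp, by omega⟩
          · rw [List.nodup_cons]
            refine ⟨fun hc => ?_, ihnd⟩
            have := (ihm d hc).2
            omega
          · intro q hq
            by_cases hqd : q = d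
            · subst hqd
              exact ⟨fun _ => List.mem_cons_self, fun _ => hdvd⟩
            · have hqnd : ¬ q ∣ d := fun hc => hqd (pvPP_dvd_eq q d hq ⟨hdp, hd⟩ hc)
              rw [← pvStrip_prime_dvd q n d hq.1 hqnd hn hd, ihsupp q hq]
              simp only [List.mem_cons]
              constructor
              · exact Or.inr
              · rintro (h | h)
                · exact absurd h hqd
                · exact h
        · rw [if_neg hmod]
          have hndvd : ¬ d ∣ n := fun hc => hmod ((PySem.Int.mod_eq_zero_iff_dvd n d).mpr hc)
          have hsmall' : ∀ q : Int, pvPP q → q < d + 1 → ¬ q ∣ n := by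
            intro q hq hqlt
            by_cases hqd : q = d
            · exact hqd ▸ hndvd
            · have : q < d := by
                rcases lt_or_eq_of_le (by omega : q ≤ d) with h | h
                · exact h
                · exact absurd h hqd
              exact hsmall q hq this
          obtain ⟨ihm, ihnd, ihsupp⟩ := ih n (d + 1) hn (by omega) hsmall' (by omega)
          refine ⟨fun p hp => ⟨(ihm p hp).1, by have := (ihm p hp).2; omega⟩, ihnd, ihsupp⟩
      · rw [if_neg hg]
        by_cases h1 : 1 < n
        · rw [if_pos h1]
          have hnp : Prime n := by
            apply pvPrime_of_no_small n (by omega)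
            intro q hq hqq hqd
            have : ¬ q < d := fun hc => hsmall q hq hc hqd
            nlinarith [hq.2]
          have hdn : d ≤ n := by
            by_contra hc
            exact hsmall n ⟨hnp, by omega⟩ (by omega) (dvd_refl n)
          refine ⟨?_, List.nodup_singleton n, ?_⟩
          · intro p hp
            rw [List.mem_singleton] at hp
            exact ⟨hp ▸ ⟨hnp, by omega⟩, by omega⟩
          · intro q hq
            rw [List.mem_singleton]
            exact ⟨fun hc => pvPP_dvd_eq q n hq ⟨hnp, by omega⟩ hc, fun hc => hc ▸ dvd_refl n⟩
        · rw [if_neg h1]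
          have hn1 : n = 1 := by omega
          subst hn1
          refine ⟨by simp, List.nodup_nil, ?_⟩
          intro q hq
          simp only [List.not_mem_nil, iff_false]
          exact hq.1.not_dvd_one

lemma pvPrimeFactors_spec (n : Int) (hn : 1 ≤ n) :
    (∀ p ∈ pvPrimeFactors n, pvPP p) ∧ (pvPrimeFactors n).Nodup ∧
    (∀ q : Int, pvPP q → (q ∣ n ↔ q ∈ pvPrimeFactors n)) := by
  obtain ⟨h1, h2, h3⟩ := pvPFGo_spec (n.toNat + 2) n 2 hn (by omega)
    (by intro q hq hlt; exact absurd hq.2 (by omega)) (by omega)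
  exact ⟨fun p hp => (h1 p hp).1, h2, h3⟩

-- ---------- B-side: coprimality facts ----------

lemma pvPP_coprime (p q : Int) (hp : pvPP p) (hq : pvPP q) (hne : p ≠ q) : IsCoprime p q := by
  rw [Int.isCoprime_iff_gcd_eq_one]
  have hp' : p.natAbs.Prime := Int.prime_iff_natAbs_prime.mp hp.1
  have hq' : q.natAbs.Prime := Int.prime_iff_natAbs_prime.mp hq.1
  have h2 := hp.2
  have h3 := hq.2
  have : p.natAbs ≠ q.natAbs := by omega
  exact (Nat.coprime_primes hp' hq').mpr this

lemma pvCoprime_prod (T : List Int) (p : Int) (h : ∀ q ∈ T, IsCoprime q p) : IsCoprime T.prod p := by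
  induction T with
  | nil => simpa using isCoprime_one_left
  | cons q T ih =>
      rw [List.prod_cons]
      exact (h q List.mem_cons_self).mul_left (ih (fun r hr => h r (List.mem_cons_of_mem q hr)))

lemma pvProd_dvd (T : List Int) (b : Int) (hT : T.Nodup) (hp : ∀ q ∈ T, pvPP q)
    (hdvd : ∀ q ∈ T, q ∣ b) : T.prod ∣ b := by
  induction T with
  | nil => simp
  | cons q T ih =>
      rw [List.prod_cons]
      rw [List.nodup_cons] at hT
      have hcop : IsCoprime q T.prod := by
        apply IsCoprime.symm
        apply pvCoprime_prod
        intro r hr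
        exact pvPP_coprime r q (hp r (List.mem_cons_of_mem q hr)) (hp q List.mem_cons_self)
          (fun hc => hT.1 (hc ▸ hr))
      exact hcop.mul_dvd (hdvd q List.mem_cons_self)
        (ih hT.2 (fun r hr => hp r (List.mem_cons_of_mem q hr))
          (fun r hr => hdvd r (List.mem_cons_of_mem q hr)))

lemma pvInd_mul (b d p : Int) (h : IsCoprime d p) : pvInd b (d * p) = pvInd b d * pvInd b p := by
  unfold pvInd
  by_cases h1 : d * p ∣ b
  · rw [if_pos h1, if_pos ((dvd_mul_right d p).trans h1), if_pos ((dvd_mul_left p d).trans h1)]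
    norm_num
  · rw [if_neg h1]
    by_cases h2 : d ∣ b
    · by_cases h3 : p ∣ b
      · exact absurd (h.mul_dvd h2 h3) h1
      · rw [if_pos h2, if_neg h3, mul_zero]
    · rw [if_neg h2, zero_mul]

-- ---------- B-side: the divisor list ----------

lemma pvDivs_go_shape (ps : List Int) : ∀ (acc : List (Int × Int)) (dm : Int × Int),
    dm ∈ ps.foldl pvDStep acc → ∃ dm0 ∈ acc, ∃ T : List Int, T.Sublist ps ∧ dm.1 = dm0.1 * T.prod := by
  induction ps with
  | nil =>
      intro acc dm h
      exact ⟨dm, h, [], List.nil_sublist [], by simp⟩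
  | cons p ps ih =>
      intro acc dm h
      rw [List.foldl_cons] at h
      obtain ⟨dm0', hmem', T', hT', heq⟩ := ih _ dm h
      unfold pvDStep at hmem'
      rw [List.mem_append] at hmem'
      rcases hmem' with hmem' | hmem'
      · exact ⟨dm0', hmem', T', hT'.cons p, heq⟩
      · obtain ⟨dm0, hdm0, hfd⟩ := List.mem_map.mp hmem'
        refine ⟨dm0, hdm0, p :: T', hT'.cons₂ p, ?_⟩
        rw [heq, ← hfd, List.prod_cons]
        ring
  
lemma pvDivs_shape (ps : List Int) (dm : Int × Int) (h : dm ∈ pvDivs ps) :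
    ∃ T : List Int, T.Sublist ps ∧ dm.1 = T.prod := by
  obtain ⟨dm0, hdm0, T, hT, heq⟩ := pvDivs_go_shape ps _ dm h
  rw [List.mem_singleton] at hdm0
  exact ⟨T, hT, by rw [heq, hdm0, one_mul]⟩

lemma pvDivs_go_sum (b : Int) : ∀ (ps : List Int) (acc : List (Int × Int)),
    (∀ p ∈ ps, pvPP p) → ps.Nodup →
    (∀ dm ∈ acc, ∀ p ∈ ps, IsCoprime dm.1 p) →
    ((ps.foldl pvDStep acc).map (fun dm => dm.2 * pvInd b dm.1)).sum
      = ((acc.map (fun dm => dm.2 * pvInd b dm.1)).sum) * ((ps.map (fun p => 1 - pvInd b p)).prod) := by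
  intro ps
  induction ps with
  | nil => intro acc _ _ _; simp
  | cons p ps ih =>
      intro acc hpp hnd hacc
      rw [List.foldl_cons]
      rw [List.nodup_cons] at hnd
      have hacc' : ∀ dm ∈ pvDStep acc p, ∀ q ∈ ps, IsCoprime dm.1 q := by
        intro dm hdm q hq
        unfold pvDStep at hdm
        rw [List.mem_append] at hdm
        rcases hdm with hdm | hdm
        · exact hacc dm hdm q (List.mem_cons_of_mem p hq)
        · obtain ⟨dm0, hdm0, hfd⟩ := List.mem_map.mp hdm
          rw [← hfd]
          exact (hacc dm0 hdm0 q (List.mem_cons_of_mem p hq)).mul_left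
            (pvPP_coprime p q (hpp p List.mem_cons_self) (hpp q (List.mem_cons_of_mem p hq))
              (fun hc => hnd.1 (hc ▸ hq)))
      rw [ih (pvDStep acc p) (fun q hq => hpp q (List.mem_cons_of_mem p hq)) hnd.2 hacc']
      have hsum : ((pvDStep acc p).map (fun dm => dm.2 * pvInd b dm.1)).sum
          = (acc.map (fun dm => dm.2 * pvInd b dm.1)).sum * (1 - pvInd b p) := by
        unfold pvDStep
        rw [List.map_append, List.sum_append, List.map_map]
        have hcong : acc.map ((fun dm => dm.2 * pvInd b dm.1) ∘ (fun dm : Int × Int => (dm.1 * p, -dm.2)))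
            = acc.map (fun dm => (dm.2 * pvInd b dm.1) * (-(pvInd b p))) := by
          apply List.map_congr_left
          intro dm hdm
          simp only [Function.comp]
          rw [pvInd_mul b dm.1 p (hacc dm hdm p List.mem_cons_self)]
          ring
        rw [hcong, List.sum_map_mul_right]
        ring
      rw [hsum, List.map_cons, List.prod_cons]
      ring

lemma pvDivs_sum (b : Int) (ps : List Int) (hpp : ∀ p ∈ ps, pvPP p) (hnd : ps.Nodup) :
    ((pvDivs ps).map (fun dm => dm.2 * pvInd b dm.1)).sum
      = (ps.map (fun p => 1 - pvInd b p)).prod := by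
  unfold pvDivs
  rw [pvDivs_go_sum b ps [((1:Int),(1:Int))] hpp hnd
      (by intro dm hdm p _; rw [List.mem_singleton] at hdm; rw [hdm]; exact isCoprime_one_left)]
  simp [pvInd]

lemma pvDivs_go_nodup (ps : List Int) : ∀ (acc : List (Int × Int)),
    (∀ p ∈ ps, pvPP p) → ps.Nodup →
    (∀ dm ∈ acc, ∀ p ∈ ps, IsCoprime dm.1 p) →
    ((acc.map Prod.fst).Nodup) →
    ((ps.foldl pvDStep acc).map Prod.fst).Nodup := by
  induction ps with
  | nil => intro acc _ _ _ h; simpa using h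
  | cons p ps ih =>
      intro acc hpp hnd hacc haccnd
      rw [List.foldl_cons]
      rw [List.nodup_cons] at hnd
      have hppp := hpp p List.mem_cons_self
      have hacc' : ∀ dm ∈ pvDStep acc p, ∀ q ∈ ps, IsCoprime dm.1 q := by
        intro dm hdm q hq
        unfold pvDStep at hdm
        rw [List.mem_append] at hdm
        rcases hdm with hdm | hdm
        · exact hacc dm hdm q (List.mem_cons_of_mem p hq)
        · obtain ⟨dm0, hdm0, hfd⟩ := List.mem_map.mp hdm
          rw [← hfd]
          exact (hacc dm0 hdm0 q (List.mem_cons_of_mem p hq)).mul_left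
            (pvPP_coprime p q hppp (hpp q (List.mem_cons_of_mem p hq)) (fun hc => hnd.1 (hc ▸ hq)))
      apply ih (pvDStep acc p) (fun q hq => hpp q (List.mem_cons_of_mem p hq)) hnd.2 hacc'
      unfold pvDStep
      rw [List.map_append, List.map_map, List.nodup_append]
      have hmapeq : acc.map (Prod.fst ∘ (fun dm : Int × Int => (dm.1 * p, -dm.2)))
          = (acc.map Prod.fst).map (· * p) := by
        rw [List.map_map]
        rfl
      rw [hmapeq]
      refine ⟨haccnd, ?_, ?_⟩
      · apply haccnd.map
        intro a b hab
        have hp0 : p ≠ 0 := by have := hppp.2; omega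
        exact mul_right_cancel₀ hp0 hab
      · intro a ha b hb hc
        obtain ⟨dm, hdm, hfst⟩ := List.mem_map.mp ha
        obtain ⟨a', ha', hb'⟩ := List.mem_map.mp hb
        subst hc
        have hcop : IsCoprime a p := hfst ▸ hacc dm hdm p List.mem_cons_self
        have hpdvd : p ∣ a := by rw [← hb']; exact dvd_mul_left p a'
        have : IsUnit p := hcop.isUnit_of_dvd' hpdvd (dvd_refl p)
        rw [Int.isUnit_iff] at this
        have := hppp.2
        omega

lemma pvDivs_fst_nodup (ps : List Int) (hpp : ∀ p ∈ ps, pvPP p) (hnd : ps.Nodup) :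
    ((pvDivs ps).map Prod.fst).Nodup := by
  apply pvDivs_go_nodup ps _ hpp hnd
  · intro dm hdm p _
    rw [List.mem_singleton] at hdm
    rw [hdm]
    exact isCoprime_one_left
  · simp

lemma pvDivs_go_complete (ps : List Int) : ∀ (acc : List (Int × Int)) (S : List Int),
    S.Sublist ps → ∀ dm0 ∈ acc, (dm0.1 * S.prod) ∈ (ps.foldl pvDStep acc).map Prod.fst := by
  induction ps with
  | nil =>
      intro acc S hS dm0 h0
      rw [List.sublist_nil] at hS
      subst hS
      simp only [List.prod_nil, mul_one, List.foldl_nil]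
      exact List.mem_map.mpr ⟨dm0, h0, rfl⟩
  | cons p ps ih =>
      intro acc S hS dm0 h0
      rw [List.foldl_cons]
      rcases List.sublist_cons_iff.mp hS with hS' | ⟨r, hr, hr'⟩
      · exact ih (pvDStep acc p) S hS' dm0 (by unfold pvDStep; exact List.mem_append_left _ h0)
      · subst hr
        have hmem : (dm0.1 * p, -dm0.2) ∈ pvDStep acc p := by
          unfold pvDStep
          exact List.mem_append_right _ (List.mem_map.mpr ⟨dm0, h0, rfl⟩)
        have := ih (pvDStep acc p) r hr' _ hmem
        simpa [List.prod_cons, mul_assoc, mul_comm, mul_left_comm] using this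

lemma pvDivs_complete (ps S : List Int) (hS : S.Sublist ps) :
    S.prod ∈ (pvDivs ps).map Prod.fst := by
  have := pvDivs_go_complete ps [((1:Int),(1:Int))] S hS ((1:Int),(1:Int)) (List.mem_singleton.mpr rfl)
  simpa using this

lemma pvMemDivs_iff (b : Int) (hb : 1 ≤ b) (T : List Int) (hT : T.Nodup)
    (hpp : ∀ q ∈ T, pvPP q) :
    (T.prod ∈ (pvDivs (pvPrimeFactors b)).map Prod.fst ↔ T.prod ∣ b) := by
  obtain ⟨hPFpp, hPFnd, hPFsupp⟩ := pvPrimeFactors_spec b hb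
  constructor
  · intro h
    obtain ⟨dm, hdm, hfst⟩ := List.mem_map.mp h
    obtain ⟨S, hSsub, hSprod⟩ := pvDivs_shape _ dm hdm
    rw [← hfst, hSprod]
    exact pvProd_dvd S b (hSsub.nodup hPFnd) (fun q hq => hPFpp q (hSsub.subset hq))
      (fun q hq => (hPFsupp q (hPFpp q (hSsub.subset hq))).mpr (hSsub.subset hq))
  · intro hdvd
    have hsub : T ⊆ pvPrimeFactors b := by
      intro q hq
      exact (hPFsupp q (hpp q hq)).mp ((List.dvd_prod hq).trans hdvd)
    obtain ⟨S, hSperm, hSsub⟩ := List.subperm_of_subset hT hsub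
    rw [← hSperm.prod_eq]
    exact pvDivs_complete _ S hSsub

lemma pvProd_eval (b : Int) (ps : List Int) :
    (ps.map (fun p => 1 - pvInd b p)).prod = (if ∀ p ∈ ps, ¬ p ∣ b then 1 else 0) := by
  induction ps with
  | nil => simp
  | cons p ps ih =>
      rw [List.map_cons, List.prod_cons, ih]
      by_cases hp : p ∣ b
      · simp [pvInd, hp]
      · have : (1 - pvInd b p) = 1 := by simp [pvInd, hp]
        rw [this, one_mul]
        by_cases hrest : ∀ q ∈ ps, ¬ q ∣ b
        · have hall : ∀ q ∈ p :: ps, ¬ q ∣ b := by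
            intro q hq
            rcases List.mem_cons.mp hq with h | h
            · exact h ▸ hp
            · exact hrest q h
          rw [if_pos hrest, if_pos hall]
        · have hnall : ¬ ∀ q ∈ p :: ps, ¬ q ∣ b := by
            intro hc
            exact hrest (fun q hq => hc q (List.mem_cons_of_mem p hq))
          rw [if_neg hrest, if_neg hnall]

lemma pvGcd_iff (a b : Int) (ha : 1 ≤ a) (_hb : 1 ≤ b) :
    (Int.gcd a b = 1) ↔ ∀ p ∈ pvPrimeFactors a, ¬ p ∣ b := by
  obtain ⟨hPFpp, hPFnd, hPFsupp⟩ := pvPrimeFactors_spec a ha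
  constructor
  · intro hg p hp hpb
    have hpa : p ∣ a := (hPFsupp p (hPFpp p hp)).mpr hp
    have hpp := hPFpp p hp
    have : p ∣ ((Int.gcd a b : Nat) : Int) := by
      have : p.natAbs ∣ Int.gcd a b := Int.dvd_gcd (Int.natAbs_dvd.mpr hpa) (Int.natAbs_dvd.mpr hpb)
      calc p ∣ (p.natAbs : Int) := (Int.dvd_natAbs.mpr (dvd_refl p))
        _ ∣ ((Int.gcd a b : Nat) : Int) := Int.natCast_dvd_natCast.mpr this
    rw [hg] at this
    exact hpp.1.not_dvd_one (by exact_mod_cast this)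
  · intro h
    by_contra hg
    have hg0 : Int.gcd a b ≠ 0 := by
      rw [Ne, Int.gcd_eq_zero_iff]
      rintro ⟨h1, -⟩
      omega
    have hg2 : 2 ≤ Int.gcd a b := by omega
    set g := Int.gcd a b with hgdef
    have hq : g.minFac.Prime := Nat.minFac_prime (by omega)
    have hqg : (g.minFac : Int) ∣ (g : Int) := Int.natCast_dvd_natCast.mpr (Nat.minFac_dvd g)
    have hqa : (g.minFac : Int) ∣ a := hqg.trans (Int.gcd_dvd_left a b)
    have hqb : (g.minFac : Int) ∣ b := hqg.trans (Int.gcd_dvd_right a b)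
    exact h _ ((hPFsupp _ (pvPP_cast _ hq)).mp hqa) hqb

-- per-pair Möbius identity: the signed divisor sum detects coprimality
lemma pvPair (x y : Int) (hx : x ≠ 0) (hy : y ≠ 0) :
    ((pvDivs (pvPrimeFactors |x|)).map
        (fun dm => dm.2 * (if pvKey dm.1 y then (1:Int) else 0))).sum
      = (if Int.gcd x y = 1 then 1 else 0) := by
  have ha : 1 ≤ |x| := by have := abs_pos.mpr hx; omega
  have hb : 1 ≤ |y| := by have := abs_pos.mpr hy; omega
  obtain ⟨hPFpp, hPFnd, hPFsupp⟩ := pvPrimeFactors_spec |x| ha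
  have hcong : (pvDivs (pvPrimeFactors |x|)).map
        (fun dm => dm.2 * (if pvKey dm.1 y then (1:Int) else 0))
      = (pvDivs (pvPrimeFactors |x|)).map (fun dm => dm.2 * pvInd |y| dm.1) := by
    apply List.map_congr_left
    intro dm hdm
    obtain ⟨T, hTsub, hTprod⟩ := pvDivs_shape _ dm hdm
    have hmem : dm.1 ∈ (pvDivs (pvPrimeFactors |y|)).map Prod.fst ↔ dm.1 ∣ |y| := by
      rw [hTprod]
      exact pvMemDivs_iff |y| hb T (hTsub.nodup hPFnd) (fun q hq => hPFpp q (hTsub.subset hq))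
    by_cases hm : dm.1 ∣ |y|
    · have hmm := hmem.mpr hm
      have hk : pvKey dm.1 y = true := by unfold pvKey; simp [hy, hmm]
      rw [hk]
      simp [pvInd, hm]
    · have hnm : dm.1 ∉ (pvDivs (pvPrimeFactors |y|)).map Prod.fst := fun hc => hm (hmem.mp hc)
      have hk : pvKey dm.1 y = false := by unfold pvKey; simp [hnm]
      rw [hk]
      simp [pvInd, hm]
  rw [hcong, pvDivs_sum |y| _ hPFpp hPFnd, pvProd_eval]
  have hgcd : Int.gcd |x| |y| = Int.gcd x y := by
    unfold Int.gcd
    rw [Int.natAbs_abs, Int.natAbs_abs]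
  rw [← hgcd]
  by_cases hg : Int.gcd |x| |y| = 1
  · rw [if_pos hg, if_pos ((pvGcd_iff |x| |y| ha hb).mp hg)]
  · rw [if_neg hg, if_neg (fun hc => hg ((pvGcd_iff |x| |y| ha hb).mpr hc))]

-- ---------- sum bookkeeping ----------

lemma pvSum_comm {α β : Type} (l1 : List α) (l2 : List β) (f : α → β → Int) :
    (l1.map (fun a => (l2.map (f a)).sum)).sum
      = (l2.map (fun b => (l1.map (fun a => f a b)).sum)).sum := by
  induction l1 with
  | nil => simp
  | cons a l1 ih =>
      rw [List.map_cons, List.sum_cons, ih]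
      have : l2.map (fun b => (((a :: l1).map (fun a => f a b)).sum))
          = l2.map (fun b => f a b + ((l1.map (fun a => f a b)).sum)) := by
        apply List.map_congr_left
        intro b _
        rw [List.map_cons, List.sum_cons]
      rw [this, PySem.List.sum_map_add_int]

lemma pvCountP_split (S : List Int) (p : Int → Bool) :
    S.countP p = S.countP (fun y => (!decide (y = 0)) && p y)
                  + S.countP (fun y => decide (y = 0) && p y) := by
  induction S with
  | nil => simp
  | cons y S ih =>
      simp only [List.countP_cons, ih]
      by_cases hy : y = 0 <;> by_cases hp : p y <;> simp [hy, hp] <;> omega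

-- decomposition of the coprime-match count of a nonzero x against S
lemma pvCnt_eq (x : Int) (_hx : x ≠ 0) (S : List Int) :
    pvCnt x S = (S.countP (fun y => decide (y ≠ 0) && decide (Int.gcd x y = 1)) : Int)
                 + (if |x| = 1 then pvZeros S else 0) := by
  unfold pvCnt pvZeros
  rw [pvCountP_split S (fun y => decide (Int.gcd x y = 1))]
  have h1 : S.countP (fun y => (!decide (y = 0)) && decide (Int.gcd x y = 1))
      = S.countP (fun y => decide (y ≠ 0) && decide (Int.gcd x y = 1)) := by
    apply List.countP_congr
    intro y _
    by_cases hy : y = 0 <;> simp [hy]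
  rw [h1]
  by_cases hx1 : |x| = 1
  · have h2 : S.countP (fun y => decide (y = 0) && decide (Int.gcd x y = 1))
        = S.countP (fun y => decide (y = 0)) := by
      apply List.countP_congr
      intro y _
      by_cases hy : y = 0
      · subst hy
        have hnat : x.natAbs = 1 := by rw [Int.abs_eq_natAbs] at hx1; omega
        simp [Int.gcd, hnat]
      · simp [hy]
    rw [h2, if_pos hx1]
    push_cast
    ring
  · have h2 : S.countP (fun y => decide (y = 0) && decide (Int.gcd x y = 1)) = 0 := by
      rw [List.countP_eq_zero]
      intro y _
      by_cases hy : y = 0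
      · subst hy
        have hnat : x.natAbs ≠ 1 := by rw [Int.abs_eq_natAbs] at hx1; omega
        simp [Int.gcd, hnat]
      · simp [hy]
    rw [h2, if_neg hx1]
    push_cast
    ring

lemma pvCnt_zero (S : List Int) : pvCnt 0 S = pvOnes S := by
  unfold pvCnt pvOnes
  congr 1
  apply List.countP_congr
  intro y _
  simp only [decide_eq_true_eq, Int.gcd_zero_left, Int.abs_eq_natAbs]
  omega

lemma pvF_snoc (S : List Int) (x : Int) : pvF (S ++ [x]) = pvCnt x S + pvF S := by
  rw [pvF_perm (List.perm_append_singleton x S)]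
  rfl

-- ---------- the main loop invariant ----------

lemma pvInv (A : List Int) :
    (A.foldl pvStep (0, 0, 0, PySem.Dict.empty)).1 = pvF A ∧
    (A.foldl pvStep (0, 0, 0, PySem.Dict.empty)).2.1 = pvZeros A ∧
    (A.foldl pvStep (0, 0, 0, PySem.Dict.empty)).2.2.1 = pvOnes A ∧
    ∀ t : Int, (A.foldl pvStep (0, 0, 0, PySem.Dict.empty)).2.2.2.getD t 0
        = (A.countP (pvKey t) : Int) := by
  induction A using List.reverseRecOn with
  | nil =>
      refine ⟨rfl, rfl, rfl, ?_⟩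
      intro t
      simp [PySem.Dict.getD_empty]
  | append_singleton S x ih =>
      rcases hst : S.foldl pvStep (0, 0, 0, PySem.Dict.empty) with ⟨c, z, o, cnt⟩
      rw [hst] at ih
      obtain ⟨hc, hz, ho, hcnt⟩ := ih
      simp only at hc hz ho hcnt
      rw [List.foldl_append, hst, List.foldl_cons, List.foldl_nil]
      by_cases hx0 : x = 0
      · subst hx0
        have : pvStep (c, z, o, cnt) 0 = (c + o, z + 1, o, cnt) := by
          simp [pvStep]
        rw [this]
        refine ⟨?_, ?_, ?_, ?_⟩
        · simp only []
          rw [pvF_snoc, pvCnt_zero, hc, ho]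
          ring
        · simp only []
          unfold pvZeros
          rw [List.countP_append, hz]
          simp [pvZeros]
        · simp only []
          unfold pvOnes
          rw [List.countP_append, ho]
          simp [pvOnes]
        · intro t
          simp only []
          rw [hcnt t, List.countP_append]
          have : pvKey t 0 = false := by simp [pvKey]
          simp [this]
      · have hx0' : ¬ (|x| = 0) := by
          simp only [abs_eq_zero]
          exact hx0
        have hstep : pvStep (c, z, o, cnt) x
            = ((pvDivs (pvPrimeFactors |x|)).foldl (fun cc dm => cc + dm.2 * cnt.getD dm.1 0) c
                 + (if |x| = 1 then z else 0),
               z,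
               (if |x| = 1 then o + 1 else o),
               (pvDivs (pvPrimeFactors |x|)).foldl
                 (fun cn (dm : Int × Int) => cn.modify dm.1 0 (· + 1)) cnt) := by
          simp only [pvStep, hx0']
          by_cases h1 : |x| = 1 <;> simp [h1]
        rw [hstep]
        have ha : 1 ≤ |x| := by have := abs_pos.mpr hx0; omega
        obtain ⟨hPFpp, hPFnd, hPFsupp⟩ := pvPrimeFactors_spec |x| ha
        refine ⟨?_, ?_, ?_, ?_⟩
        · -- the count component
          simp only []
          rw [show (fun (cc : Int) (dm : Int × Int) => cc + dm.2 * cnt.getD dm.1 0)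
                = (fun (cc : Int) (dm : Int × Int) => cc + (fun dm : Int × Int => dm.2 * cnt.getD dm.1 0) dm) from rfl]
          rw [PySem.List.foldl_add]
          have hsum : ((pvDivs (pvPrimeFactors |x|)).map (fun dm => dm.2 * cnt.getD dm.1 0)).sum
              = (S.countP (fun y => decide (y ≠ 0) && decide (Int.gcd x y = 1)) : Int) := by
            have h1 : (pvDivs (pvPrimeFactors |x|)).map (fun dm => dm.2 * cnt.getD dm.1 0)
                = (pvDivs (pvPrimeFactors |x|)).map
                    (fun dm => (S.map (fun y => dm.2 * (if pvKey dm.1 y then (1:Int) else 0))).sum) := by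
              apply List.map_congr_left
              intro dm _
              rw [hcnt dm.1, ← PySem.List.sum_map_ite_one_zero (pvKey dm.1) S,
                  ← List.sum_map_mul_left]
            rw [h1, pvSum_comm]
            have h2 : S.map (fun y => ((pvDivs (pvPrimeFactors |x|)).map
                  (fun dm => dm.2 * (if pvKey dm.1 y then (1:Int) else 0))).sum)
                = S.map (fun y => if (decide (y ≠ 0) && decide (Int.gcd x y = 1)) then (1:Int) else 0) := by
              apply List.map_congr_left
              intro y _
              by_cases hy : y = 0
              · subst hy
                have : ∀ dm ∈ pvDivs (pvPrimeFactors |x|),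
                    dm.2 * (if pvKey dm.1 0 then (1:Int) else 0) = 0 := by
                  intro dm _
                  simp [pvKey]
                rw [List.map_congr_left (fun dm hdm => this dm hdm)]
                simp
              · rw [pvPair x y hx0 hy]
                simp [hy]
            rw [h2, PySem.List.sum_map_ite_one_zero]
          rw [hsum, pvF_snoc, pvCnt_eq x hx0 S, hc, hz]
          by_cases h1 : |x| = 1
          · rw [if_pos h1]
            ring
          · rw [if_neg h1]
            ring
        · simp only []
          unfold pvZeros
          rw [List.countP_append, hz]
          simp [pvZeros, hx0]
        · simp only []
          unfold pvOnes
          rw [List.countP_append, ho]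
          by_cases h1 : |x| = 1 <;> simp [pvOnes, h1]
        · intro t
          simp only []
          rw [List.foldl_map (f := Prod.fst)
                (g := fun cn (tt : Int) => cn.modify tt 0 (· + 1)) (l := pvDivs (pvPrimeFactors |x|))
                (init := cnt) |>.symm]
          rw [PySem.Dict.getD_foldl_modify_add_one, hcnt t, List.countP_append]
          have hkey : pvKey t x = decide (t ∈ (pvDivs (pvPrimeFactors |x|)).map Prod.fst) := by
            unfold pvKey
            simp [hx0]
          by_cases hm : t ∈ (pvDivs (pvPrimeFactors |x|)).map Prod.fst
          · rw [List.count_eq_one_of_mem (pvDivs_fst_nodup _ hPFpp hPFnd) hm]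
            simp [hkey, hm]
          · rw [List.count_eq_zero_of_not_mem hm]
            simp [hkey, hm]

lemma alt_eq_pvF (A : List Int) : coprime_edge_count_alt A = pvF A := by
  unfold coprime_edge_count_alt
  exact (pvInv A).1

-- ===== VERDICT (by name: the statement is the Claim_ definition above) =====
theorem coprime_edge_count_spec : Claim_equal_coprime_edge_count := by
  intro A _
  unfold Spec_coprime_edge_count
  rw [alt_eq_pvF, a_eq_pvF_sorted]
  exact pvF_perm (PySem.List.sorted_perm A (fun x => x) false)
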